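-- pv_equiv track=rewrite | github.com/Ignaciogg/ReadyRecipes-Front | TratamientoDatos.py | tratamientoBasico
-- ===== SOURCE A (Python) =====
-- def tratamientoBasico(tokens):
--     caracteres = "0123456789ºª!·$%&/()=|@#~€¬'?¡¿`+^*[]´¨}{,.-;:_<>\n \""
--     listaTratada = []
--     for token in tokens :
--         for i in range (len(caracteres)):
--             token = token.replace(caracteres[i],"")
--         if(token != ""):
--             listaTratada.append(token.lower())
--     return listaTratada
-- ===== SOURCE B (Python) =====
-- def tratamientoBasico(tokens):
--     forbidden = frozenset("0123456789ºª!·$%&/()=|@#~€¬'?¡¿`+^*[]´¨}{,.-;:_<>\n \"")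
--     listaTratada = []
--     for token in tokens:
--         limpio = "".join(ch for ch in token if ch not in forbidden).lower()
--         if limpio:
--             listaTratada.append(limpio)
--     return listaTratada
-- ===== Notes on version B (the rewrite author's own statement) =====
-- stated objective: faster
-- what changed: B builds the blacklist as a frozenset once and cleans each token with a single character-filtering pass, instead of A's loop over all 54 blacklist characters calling str.replace (a full scan of the token) for each.
import Mathlib
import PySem

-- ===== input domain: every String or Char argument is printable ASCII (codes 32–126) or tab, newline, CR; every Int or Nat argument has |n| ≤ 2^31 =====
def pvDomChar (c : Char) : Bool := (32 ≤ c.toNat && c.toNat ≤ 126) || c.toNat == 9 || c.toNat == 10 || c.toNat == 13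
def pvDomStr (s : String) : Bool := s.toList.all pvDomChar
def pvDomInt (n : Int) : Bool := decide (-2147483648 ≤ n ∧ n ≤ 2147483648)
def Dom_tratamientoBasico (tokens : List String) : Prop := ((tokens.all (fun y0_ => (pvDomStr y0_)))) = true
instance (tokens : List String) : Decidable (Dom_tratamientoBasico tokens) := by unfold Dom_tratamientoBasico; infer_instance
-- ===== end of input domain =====

-- B cleans each token in a single character-filter pass against a set built once,
-- instead of A's 54 str.replace passes per token (objective: faster, constant factor).


-- the blacklist literal shared by both sources
def pvCarac : List Char := "0123456789ºª!·$%&/()=|@#~€¬'?¡¿`+^*[]´¨}{,.-;:_<>\n \"".toList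

-- ===== PORT A =====
-- A: for each token, for i in range(len(caracteres)): token = token.replace(caracteres[i], "");
-- then append token.lower() if token != "".
def tratamientoBasico (tokens : List String) : List String :=
  tokens.foldl (fun listaTratada token =>
    let t := pvCarac.foldl (fun t c => PySem.Chars.replace t [c] []) token.toList
    if t ≠ [] then listaTratada ++ [String.ofList (PySem.Chars.lower t)] else listaTratada) []

-- ===== PORT B =====
-- B: forbidden set built once; one filtering pass per token, then lower, keep if nonempty.
def tratamientoBasico_alt (tokens : List String) : List String :=
  let forbidden : PySem.Set Char := PySem.Set.ofList pvCarac
  tokens.foldl (fun listaTratada token =>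
    let limpio := PySem.Chars.lower (token.toList.filter (fun ch => !(forbidden.contains ch)))
    if limpio ≠ [] then listaTratada ++ [String.ofList limpio] else listaTratada) []

-- ===== PRECONDITION & SPEC =====
def Spec_tratamientoBasico (tokens : List String) (out : List String) : Prop := out = tratamientoBasico_alt tokens
instance (tokens : List String) (out : List String) : Decidable (Spec_tratamientoBasico tokens out) := by unfold Spec_tratamientoBasico; infer_instance

-- ===== CLAIM (what is proved, stated in full; the proofs are below) =====
def Claim_equal_tratamientoBasico : Prop := ∀ (tokens : List String), Dom_tratamientoBasico tokens → Spec_tratamientoBasico tokens (tratamientoBasico tokens)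

-- ===== LEMMAS AND PROOFS =====

-- s.replace(c, "") for a single character c is exactly the filter dropping c
theorem pv_go_single (c : Char) (l acc : List Char) (fuel : Nat) (h : l.length ≤ fuel) :
    PySem.Chars.replace.go [c] [] fuel l acc = acc.reverse ++ l.filter (fun x => x ≠ c) := by
  induction l generalizing fuel acc with
  | nil => cases fuel <;> simp [PySem.Chars.replace.go]
  | cons a t ih =>
    cases fuel with
    | zero => simp at h
    | succ f =>
      rw [PySem.Chars.replace.go]
      by_cases hac : a = c
      · subst hac
        simp [List.isPrefixOf, ih acc f (by simpa using h)]
      · have hp : List.isPrefixOf [c] (a :: t) = false := by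
          simp [List.isPrefixOf]; exact fun h' => (hac h'.symm).elim
        simp [hp, ih (a :: acc) f (by simpa using h), hac]

theorem pv_replace_single (cs : List Char) (c : Char) :
    PySem.Chars.replace cs [c] [] = cs.filter (fun x => x ≠ c) := by
  rw [PySem.Chars.replace]
  simp [pv_go_single c cs [] cs.length le_rfl]

-- A's sequence of per-character removals is one filter against the whole list
theorem pv_foldl_filter (cs : List Char) (t : List Char) :
    cs.foldl (fun t c => t.filter (fun x => x ≠ c)) t = t.filter (fun x => !cs.contains x) := by
  induction cs generalizing t with
  | nil => simp
  | cons c cs ih =>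
    simp only [List.foldl_cons, ih, List.filter_filter]
    congr 1
    funext x
    by_cases hx : x = c <;> simp [hx]

theorem pv_set_contains (l : List Char) (x : Char) :
    (PySem.Set.ofList l).contains x = l.contains x := by
  simp [PySem.Set.mem_ofList]

-- ===== VERDICT (by name: the statement is the Claim_ definition above) =====
theorem tratamientoBasico_spec : Claim_equal_tratamientoBasico := by
  intro tokens _
  show tratamientoBasico tokens = tratamientoBasico_alt tokens
  have hrep : (fun (t : List Char) (c : Char) => PySem.Chars.replace t [c] []) =
      fun t c => t.filter (fun x => x ≠ c) := by
    funext t c; exact pv_replace_single t c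
  simp only [tratamientoBasico, tratamientoBasico_alt]
  apply List.foldl_ext
  intro acc token _
  simp only [hrep, pv_foldl_filter, pv_set_contains, PySem.Chars.lower, ne_eq,
    List.map_eq_nil_iff]
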